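-- pv_equiv track=rewrite | github.com/DanielGall500/irish-syntax-parser | src/main_a.py | up_to_end_of_sentence
-- ===== SOURCE A (Python) =====
-- eos_chars = ['.',',','?','!','-','\'', '>', '<']
--
-- def up_to_end_of_sentence(T: str) -> str:
--     final_string = ""
--     for c in T:
--         if c not in eos_chars:
--             final_string += c
--         else:
--             break
--     return final_string
-- ===== SOURCE B (Python) =====
-- eos_chars = ['.', ',', '?', '!', '-', '\'', '>', '<']
--
-- def up_to_end_of_sentence(T: str) -> str:
--     positions = [p for p in (T.find(c) for c in eos_chars) if p >= 0]
--     if not positions: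
--         return T
--     return T[:min(positions)]
-- ===== Notes on version B (the rewrite author's own statement) =====
-- stated objective: faster
-- what changed: Instead of accumulating characters one by one in a Python-level loop with a break, B calls str.find once per delimiter, takes the minimum non-negative position, and slices the prefix in one step (returning T unchanged when no delimiter occurs).
import Mathlib
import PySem

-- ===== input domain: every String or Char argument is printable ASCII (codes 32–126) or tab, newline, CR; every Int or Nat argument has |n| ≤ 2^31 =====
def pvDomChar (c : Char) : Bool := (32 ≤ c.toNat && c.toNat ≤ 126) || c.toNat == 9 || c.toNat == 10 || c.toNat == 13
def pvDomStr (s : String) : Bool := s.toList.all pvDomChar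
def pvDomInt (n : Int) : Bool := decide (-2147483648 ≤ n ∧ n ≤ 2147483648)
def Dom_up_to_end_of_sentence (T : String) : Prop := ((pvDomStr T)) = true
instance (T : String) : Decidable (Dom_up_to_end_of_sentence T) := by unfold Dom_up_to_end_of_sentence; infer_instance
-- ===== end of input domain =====

-- B replaces A's character-by-character accumulation loop with per-delimiter str.find calls,
-- a minimum over the non-negative positions, and a single slice (objective: faster, C-level scans replace the per-character Python loop).

-- ===== PORT A =====
def eosChars : List Char := ['.', ',', '?', '!', '-', '\'', '>', '<']

-- A's loop: final_string accumulator, break on the first end-of-sentence character.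
def upLoopA (acc : List Char) : List Char → List Char
  | [] => acc
  | c :: cs => if !(eosChars.contains c) then upLoopA (acc ++ [c]) cs else acc

def up_to_end_of_sentence (T : String) : String :=
  String.ofList (upLoopA [] T.toList)

-- ===== PORT B =====
def eosStrs : List String := [".", ",", "?", "!", "-", "'", ">", "<"]

def up_to_end_of_sentence_alt (T : String) : String :=
  let positions := (eosStrs.map (fun c => PySem.Str.find T c)).filter (fun p => decide (0 ≤ p))
  match PySem.List.min? positions (fun p => p) with
  | none => T
  | some m => PySem.Str.slice T none (some m)

-- ===== PRECONDITION & SPEC =====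
def Spec_up_to_end_of_sentence (T : String) (out : String) : Prop := out = up_to_end_of_sentence_alt T
instance (T : String) (out : String) : Decidable (Spec_up_to_end_of_sentence T out) := by unfold Spec_up_to_end_of_sentence; infer_instance

-- ===== CLAIM (what is proved, stated in full; the proofs are below) =====
def Claim_equal_up_to_end_of_sentence : Prop := ∀ (T : String), Dom_up_to_end_of_sentence T → Spec_up_to_end_of_sentence T (up_to_end_of_sentence T)

-- ===== LEMMAS AND PROOFS =====

-- the predicate kept by A's loop
def keepChar (c : Char) : Bool := !(eosChars.contains c)

lemma upLoopA_eq_takeWhile (s acc : List Char) :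
    upLoopA acc s = acc ++ s.takeWhile keepChar := by
  induction s generalizing acc with
  | nil => simp [upLoopA]
  | cons c cs ih =>
    by_cases h : c ∈ eosChars
    · simp [upLoopA, h, List.takeWhile, keepChar]
    · simp [upLoopA, h, List.takeWhile, keepChar, ih]

lemma singleton_prefix_iff (c : Char) (s : List Char) : [c] <+: s ↔ s.head? = some c := by
  cases s with
  | nil => simp
  | cons a t =>
    constructor
    · rintro ⟨u, hu⟩; simp at hu; simp [hu.1]
    · intro h; simp at h; exact ⟨t, by simp [h]⟩

-- characterization of find for a single-character needle
lemma find_single_neg (s : List Char) (c : Char) :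
    PySem.Chars.find s [c] = -1 ↔ c ∉ s := by
  rw [PySem.Chars.find_eq_neg_one_iff, List.singleton_infix_iff]

lemma find_single_spec (s : List Char) (c : Char) (h : 0 ≤ PySem.Chars.find s [c]) :
    s[(PySem.Chars.find s [c]).toNat]? = some c ∧
      ∀ i < (PySem.Chars.find s [c]).toNat, s[i]? ≠ some c := by
  obtain ⟨h1, h2⟩ := PySem.Chars.find_spec (s := s) (sub := [c]) h
  rw [singleton_prefix_iff, List.head?_drop] at h1
  refine ⟨h1, fun i hi hc => h2 i hi ?_⟩
  rw [singleton_prefix_iff, List.head?_drop]; exact hc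

-- the cut index: length of the kept prefix
def cutLen (s : List Char) : Nat := (s.takeWhile keepChar).length

lemma cutLen_le (s : List Char) : cutLen s ≤ s.length :=
  (List.takeWhile_prefix keepChar).length_le

lemma takeWhile_eq_take (s : List Char) : s.takeWhile keepChar = s.take (cutLen s) :=
  List.prefix_iff_eq_take.mp (List.takeWhile_prefix keepChar)

lemma keep_before_cut (s : List Char) (i : Nat) (hi : i < cutLen s) (c : Char)
    (hc : s[i]? = some c) : keepChar c = true := by
  have hilen : i < s.length := lt_of_lt_of_le hi (cutLen_le s)
  have hmem : s[i] ∈ s.takeWhile keepChar := by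
    rw [takeWhile_eq_take]
    have hg : (s.take (cutLen s))[i]? = some s[i] := by
      rw [List.getElem?_take]; simp [hi, hilen]
    exact List.mem_of_getElem? hg
  have hk := List.mem_takeWhile_imp hmem
  have hce : c = s[i] := by
    rw [List.getElem?_eq_getElem hilen] at hc
    exact (Option.some_inj.mp hc).symm
  exact hce ▸ hk

lemma not_keep_at_cut (s : List Char) (h : cutLen s < s.length) :
    keepChar s[cutLen s] = false := by
  unfold cutLen at *
  induction s with
  | nil => simp at h
  | cons a t ih =>
    by_cases ha : keepChar a
    · simp [List.takeWhile, ha] at h ⊢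
      exact ih h
    · simp [List.takeWhile, ha]

-- every find position of an end-of-sentence character lands at or after the cut
lemma find_ge_cut (s : List Char) (c : Char) (hc : eosChars.contains c = true)
    (h : 0 ≤ PySem.Chars.find s [c]) :
    cutLen s ≤ (PySem.Chars.find s [c]).toNat := by
  by_contra hlt
  push Not at hlt
  obtain ⟨h1, _⟩ := find_single_spec s c h
  have := keep_before_cut s _ hlt c h1
  simp [keepChar] at this
  exact this (by simpa using hc)

-- and the character at the cut realizes exactly the cut position
lemma find_at_cut (s : List Char) (h : cutLen s < s.length) :
    PySem.Chars.find s [s[cutLen s]] = (cutLen s : Int) := by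
  have hmem : s[cutLen s] ∈ s := List.getElem_mem _
  have hnneg : 0 ≤ PySem.Chars.find s [s[cutLen s]] := by
    rw [PySem.Chars.find_nonneg_iff, List.singleton_infix_iff]; exact hmem
  obtain ⟨_, h2⟩ := find_single_spec s _ hnneg
  have hkeep : eosChars.contains s[cutLen s] = true := by
    have := not_keep_at_cut s h
    simpa [keepChar] using this
  have hge := find_ge_cut s _ hkeep hnneg
  have hle : (PySem.Chars.find s [s[cutLen s]]).toNat ≤ cutLen s := by
    by_contra hlt
    push Not at hlt
    exact h2 (cutLen s) hlt (by simp [List.getElem?_eq_getElem h])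
  omega

-- each list member of eosChars comes from a member of eosStrs and vice versa
lemma eosStrs_of_char (c : Char) (hc : eosChars.contains c = true) :
    ∃ t ∈ eosStrs, t.toList = [c] := by
  simp [eosChars] at hc
  rcases hc with h|h|h|h|h|h|h|h <;> subst h
  · exact ⟨".", by simp [eosStrs], rfl⟩
  · exact ⟨",", by simp [eosStrs], rfl⟩
  · exact ⟨"?", by simp [eosStrs], rfl⟩
  · exact ⟨"!", by simp [eosStrs], rfl⟩
  · exact ⟨"-", by simp [eosStrs], rfl⟩
  · exact ⟨"'", by simp [eosStrs], rfl⟩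
  · exact ⟨">", by simp [eosStrs], rfl⟩
  · exact ⟨"<", by simp [eosStrs], rfl⟩

lemma eosStrs_to_char (t : String) (ht : t ∈ eosStrs) :
    ∃ c, t.toList = [c] ∧ eosChars.contains c = true := by
  simp [eosStrs] at ht
  rcases ht with h|h|h|h|h|h|h|h <;> subst h <;> exact ⟨_, rfl, by decide⟩

-- ===== VERDICT (by name: the statement is the Claim_ definition above) =====
theorem up_to_end_of_sentence_spec : Claim_equal_up_to_end_of_sentence := by
  intro T _
  unfold Spec_up_to_end_of_sentence up_to_end_of_sentence up_to_end_of_sentence_alt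
  set s := T.toList with hs
  rw [upLoopA_eq_takeWhile]
  simp only [List.nil_append]
  set positions := (eosStrs.map (fun c => PySem.Str.find T c)).filter (fun p => decide (0 ≤ p)) with hpos
  -- a general lower bound on every position
  have hlow : ∀ q ∈ positions, (cutLen s : Int) ≤ q := by
    intro q hq
    rw [hpos, List.mem_filter] at hq
    obtain ⟨hqm, hq0⟩ := hq
    simp only [decide_eq_true_eq] at hq0
    rw [List.mem_map] at hqm
    obtain ⟨t, ht, hqt⟩ := hqm
    obtain ⟨c, htc, hcc⟩ := eosStrs_to_char t ht
    have hfind : q = PySem.Chars.find s [c] := by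
      rw [← hqt]
      simp [PySem.Str.find_eq, htc, hs]
    rw [hfind] at hq0 ⊢
    have := find_ge_cut s c hcc hq0
    omega
  by_cases hcut : cutLen s < s.length
  · -- a delimiter exists: min of positions is exactly cutLen s
    have hkeep : eosChars.contains s[cutLen s] = true := by
      have := not_keep_at_cut s hcut
      simpa [keepChar] using this
    obtain ⟨t, ht, htc⟩ := eosStrs_of_char _ hkeep
    have hkmem : (cutLen s : Int) ∈ positions := by
      rw [hpos, List.mem_filter]
      constructor
      · rw [List.mem_map]
        refine ⟨t, ht, ?_⟩
        simp [PySem.Str.find_eq, htc, ← hs, find_at_cut s hcut]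
      · simp
    have hne : positions ≠ [] := fun he => by simp [he] at hkmem
    obtain ⟨m, hm⟩ : ∃ m, PySem.List.min? positions (fun p => p) = some m := by
      cases hmin : PySem.List.min? positions (fun p => p) with
      | none => exact absurd ((PySem.List.min?_eq_none_iff _ _).mp hmin) hne
      | some m => exact ⟨m, rfl⟩
    have hmk : m = (cutLen s : Int) := by
      have h1 := PySem.List.min?_isMin hm _ hkmem
      have h2 := hlow m (PySem.List.min?_mem hm)
      simp only at h1
      omega
    rw [hm, hmk]
    apply String.toList_inj.mp
    rw [takeWhile_eq_take]
    simp [PySem.Str.toList_slice, PySem.List.slice_to_natCast, hs]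
  · -- no delimiter: every find is -1, positions is empty, B returns T unchanged
    have hall : cutLen s = s.length := le_antisymm (cutLen_le s) (not_lt.mp hcut)
    have hempty : positions = [] := by
      rw [hpos, List.filter_eq_nil_iff]
      intro q hq
      rw [List.mem_map] at hq
      obtain ⟨t, ht, hqt⟩ := hq
      obtain ⟨c, htc, hcc⟩ := eosStrs_to_char t ht
      have hnm : c ∉ s := by
        intro hmem
        obtain ⟨i, hi, hieq⟩ := List.getElem_of_mem hmem
        have : keepChar c = true :=
          keep_before_cut s i (by omega) c (by rw [List.getElem?_eq_getElem hi]; exact congrArg some hieq)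
        simp [keepChar] at this
        exact this (by simpa using hcc)
      have : q = (-1 : Int) := by
        rw [← hqt]
        simp only [PySem.Str.find_eq, htc, ← hs]
        exact (find_single_neg s c).mpr hnm
      simp [this]
    rw [hempty]
    rw [(PySem.List.min?_eq_none_iff ([] : List Int) (fun p => p)).mpr rfl]
    apply String.toList_inj.mp
    rw [takeWhile_eq_take, hall]
    simp [hs]
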